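-- pv_equiv track=rewrite | github.com/Hemang71006/Sports-Fixture-App | tournament_bracket.py | arrange_teams
-- ===== SOURCE A (Python) =====
-- from typing import List
--
-- def next_power_of_two(x: int) -> int:
--     return 1 << (x - 1).bit_length()
--
-- def seeding_map(n: int) -> List[int]:
--     """
--     Return a list of bracket positions (1-indexed) for
--     seeds 1..n in classic order:
--       seed1 bottom, seed2 top, seed3 bottom of top half,
--       seed4 top of bottom half, etc.
--     """
--     if n == 1:
--         return [1]
--     half = n // 2
--     top = seeding_map(half)
--     bottom = seeding_map(half)
--     return [p for p in top] + [p + half for p in bottom]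
--
-- def arrange_teams(total: int, seeds: List[str], others: List[str]) -> List[str]:
--     """
--     Place teams and BYEs so that:
--       * seed 1 is at bottom,
--       * seed 2 is at top,
--       * BYEs are assigned to the *lowest seeds*.
--     """
--     slots = next_power_of_two(total)
--     mapping = seeding_map(slots)          # visual position for each seed number
--     seed_count = total
--     bye_count = slots - total
--
--     # full list of team names in seed order
--     allteams = list(seeds) + list(others)
--     while len(allteams) < total:
--         allteams.append(f"Team{len(allteams)+1}")
--
--     # seed numbers that should become BYEs: the lowest-priority ones
--     bye_seeds = set(range(seed_count - bye_count + 1, seed_count + 1))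
--
--     placed = [""] * slots
--     for seed_num in range(1, slots + 1):
--         pos = mapping[seed_num - 1] - 1
--         if seed_num <= seed_count:
--             if seed_num in bye_seeds:
--                 placed[pos] = "BYE"
--             else:
--                 placed[pos] = allteams[seed_num - 1]
--         else:
--             placed[pos] = "BYE"
--     return placed
-- ===== SOURCE B (Python) =====
-- from typing import List
--
-- def next_power_of_two(x: int) -> int:
--     return 1 << (x - 1).bit_length()
--
-- def arrange_teams(total: int, seeds: List[str], others: List[str]) -> List[str]:
--     # seeding_map(2**e) is the identity permutation [1..2**e], so bracket
--     # position i simply holds seed i+1: the result is the first k real teams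
--     # (k = 2*total - slots, the seeds that avoid a BYE) followed by BYEs.
--     slots = next_power_of_two(total)
--     names = (list(seeds) + list(others))[:total]
--     names += [f"Team{i}" for i in range(len(names) + 1, total + 1)]
--     k = max(2 * total - slots, 0)
--     return names[:k] + ["BYE"] * (slots - k)
-- ===== Notes on version B (the rewrite author's own statement) =====
-- stated objective: faster
-- what changed: B replaces the recursive seeding_map (which on a power of two is the identity permutation) and the position-scatter loop by a closed form: take the first max(2*total-slots,0) team names (padding with TeamN via one comprehension) and append the BYEs.
import Mathlib
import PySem

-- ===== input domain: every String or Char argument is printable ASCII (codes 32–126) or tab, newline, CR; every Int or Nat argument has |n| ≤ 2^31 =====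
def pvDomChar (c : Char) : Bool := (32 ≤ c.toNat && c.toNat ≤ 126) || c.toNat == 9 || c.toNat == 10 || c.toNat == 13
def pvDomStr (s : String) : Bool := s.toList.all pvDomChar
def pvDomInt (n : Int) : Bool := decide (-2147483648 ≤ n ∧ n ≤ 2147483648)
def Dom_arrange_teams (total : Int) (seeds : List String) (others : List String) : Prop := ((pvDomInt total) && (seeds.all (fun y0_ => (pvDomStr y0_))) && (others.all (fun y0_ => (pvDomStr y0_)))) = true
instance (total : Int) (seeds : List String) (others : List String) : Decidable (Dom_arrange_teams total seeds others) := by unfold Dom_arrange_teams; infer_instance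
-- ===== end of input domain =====

-- B replaces A's recursive seeding_map (identity on a power of two) and position-scatter loop
-- by a closed form: first max(2*total-slots,0) padded team names, then BYEs. Objective: faster.


-- ===== PORT A =====
-- 1 << b ported as 2^b (exact: the shift amount is a Nat)
def next_power_of_two (x : Int) : Int := (2 : Int) ^ (PySem.Int.bitLength (x - 1))

-- Python's seeding_map diverges for n ≤ 0 (unbounded recursion); arrange_teams only calls it
-- with n = a positive power of two, where this port is exact. The n ≤ 0 branch returns [].
def seeding_map (n : Int) : List Int :=
  if n = 1 then [1]
  else if n ≤ 1 then []
  else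
    let half := PySem.Int.floordiv n 2
    let top := seeding_map half
    let bottom := seeding_map half
    top.map (fun p => p) ++ bottom.map (fun p => p + half)
termination_by n.toNat
decreasing_by
  all_goals
    rw [PySem.Int.floordiv_eq_ediv_of_pos (by omega)]
    omega

-- the 'while len(allteams) < total: allteams.append(f"Team{len+1}")' loop
def pad_teams (allteams : List String) (total : Int) : List String :=
  if (allteams.length : Int) < total then
    pad_teams (allteams ++ ["Team" ++ PySem.Int.toStr ((allteams.length : Int) + 1)]) total
  else allteams
termination_by (total - allteams.length).toNat
decreasing_by simp only [List.length_append, List.length_cons, List.length_nil]; omega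

def arrange_teams (total : Int) (seeds : List String) (others : List String) : List String :=
  let slots := next_power_of_two total
  let mapping := seeding_map slots
  let seed_count := total
  let bye_count := slots - total
  let allteams := pad_teams (seeds ++ others) total
  let bye_seeds : PySem.Set Int :=
    PySem.Set.ofList (PySem.List.pyRange (seed_count - bye_count + 1) (seed_count + 1) 1)
  let placed : List String := List.replicate slots.toNat ""
  (PySem.List.pyRange 1 (slots + 1) 1).foldl (fun placed seed_num =>
    let pos := PySem.List.pyGetD mapping (seed_num - 1) 0 - 1
    if seed_num ≤ seed_count then
      if PySem.Set.contains bye_seeds seed_num then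
        PySem.List.pySetD placed pos "BYE"
      else
        PySem.List.pySetD placed pos (PySem.List.pyGetD allteams (seed_num - 1) "")
    else
      PySem.List.pySetD placed pos "BYE") placed

-- ===== PORT B =====
def next_power_of_two_b (x : Int) : Int := (2 : Int) ^ (PySem.Int.bitLength (x - 1))

def arrange_teams_alt (total : Int) (seeds : List String) (others : List String) : List String :=
  let slots := next_power_of_two_b total
  let names := PySem.List.slice (seeds ++ others) none (some total)
  let names := names ++
    (PySem.List.pyRange ((names.length : Int) + 1) (total + 1) 1).map
      (fun i => "Team" ++ PySem.Int.toStr i)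
  let k := max (2 * total - slots) 0
  PySem.List.slice names none (some k) ++ List.replicate (slots - k).toNat "BYE"

-- ===== PRECONDITION & SPEC =====
def Spec_arrange_teams (total : Int) (seeds : List String) (others : List String) (out : List String) : Prop := out = arrange_teams_alt total seeds others
instance (total : Int) (seeds : List String) (others : List String) (out : List String) : Decidable (Spec_arrange_teams total seeds others out) := by unfold Spec_arrange_teams; infer_instance

-- ===== CLAIM (what is proved, stated in full; the proofs are below) =====
def Claim_equal_arrange_teams : Prop := ∀ (total : Int) (seeds : List String) (others : List String), Dom_arrange_teams total seeds others → Spec_arrange_teams total seeds others (arrange_teams total seeds others)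

-- ===== LEMMAS AND PROOFS =====

-- seeding_map on a power of two is the identity permutation [1..2^e]
theorem seeding_map_pow (e : Nat) :
    seeding_map ((2:Nat)^e : Nat) = (List.range (2^e)).map (fun i : Nat => ((i:Int)+1)) := by
  induction e with
  | zero => simp [seeding_map]
  | succ e ih =>
    rw [seeding_map]
    have ht : (1:Int) < ((2:Nat)^(e+1) : Nat) := by
      exact_mod_cast Nat.one_lt_two_pow_iff.mpr (by omega)
    have h2 : ((2:Nat)^(e+1) : Nat) ≠ (1:Int) := ne_of_gt ht
    have h3 : ¬ (((2:Nat)^(e+1) : Nat) : Int) ≤ 1 := not_le.mpr ht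
    rw [if_neg h2, if_neg h3]
    have hhalf : PySem.Int.floordiv (((2:Nat)^(e+1) : Nat) : Int) 2 = ((2:Nat)^e : Nat) := by
      rw [PySem.Int.floordiv_eq_ediv_of_pos (by omega)]
      push_cast [pow_succ]
      omega
    simp only [hhalf, ih]
    have hsum : (2:Nat)^(e+1) = 2^e + 2^e := by ring
    rw [hsum, List.range_add, List.map_append]
    congr 1
    · simp
    · rw [List.map_map, List.map_map]
      apply List.map_congr_left
      intro i _
      simp only [Function.comp_apply]
      push_cast
      ring

theorem set_take_succ (acc : List String) (j : Nat) (v : String) (h : j < acc.length) :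
    (acc.set j v).take (j+1) = acc.take j ++ [v] := by
  rw [List.set_eq_take_append_cons_drop, if_pos h, List.take_append]
  simp [List.length_take, Nat.min_eq_left h.le]

-- the while-append loop appends Team(L+1) .. Team(total)
theorem pad_spec (total : Int) (xs : List String) :
    pad_teams xs total = xs ++ (PySem.List.pyRange ((xs.length:Int)+1) (total+1) 1).map
      (fun i => "Team" ++ PySem.Int.toStr i) := by
  by_cases h : (xs.length : Int) < total
  · rw [pad_teams, if_pos h]
    rw [pad_spec total (xs ++ ["Team" ++ PySem.Int.toStr ((xs.length : Int) + 1)])]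
    rw [PySem.List.pyRange_one_cons (by omega : (xs.length:Int)+1 < total+1)]
    simp only [List.length_append, List.length_cons, List.length_nil, List.map_cons,
      List.append_assoc, List.cons_append, List.nil_append]
    push_cast
    ring_nf
  · rw [pad_teams, if_neg h]
    rw [PySem.List.pyRange_one_eq_nil (by omega)]
    simp
termination_by (total - xs.length).toNat
decreasing_by simp only [List.length_append, List.length_cons, List.length_nil]; omega

-- A's placement loop writes positions j, j+1, …, n-1 in order
theorem foldl_set_range (g : Int → String) (n : Nat) :
    ∀ (j : Nat) (acc : List String), acc.length = n →
    (PySem.List.pyRange ((j:Int)+1) ((n:Int)+1) 1).foldl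
        (fun pl s => PySem.List.pySetD pl (s-1) (g s)) acc
      = acc.take j ++ (PySem.List.pyRange ((j:Int)+1) ((n:Int)+1) 1).map g := by
  intro j
  induction hd : n - j generalizing j with
  | zero =>
    intro acc hlen
    have hnil : PySem.List.pyRange ((j:Int)+1) ((n:Int)+1) 1 = [] :=
      PySem.List.pyRange_one_eq_nil (by omega)
    rw [hnil]
    simp [List.take_of_length_le (show acc.length ≤ j by omega)]
  | succ d ihd =>
    intro acc hlen
    rw [PySem.List.pyRange_one_cons (by omega : (j:Int)+1 < (n:Int)+1)]
    simp only [List.foldl_cons, List.map_cons]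
    have hstep : PySem.List.pySetD acc ((j:Int)+1-1) (g ((j:Int)+1)) = acc.set j (g ((j:Int)+1)) := by
      have : ((j:Int)+1-1) = (j:Int) := by ring
      rw [this, PySem.List.pySetD_natCast]
    rw [hstep]
    have hc : ((j:Int)+1+1) = (((j+1:Nat)):Int)+1 := by push_cast; ring
    rw [hc]
    rw [ihd (j+1) (by omega) _ (by simp [hlen])]
    have hj : j < acc.length := by omega
    rw [set_take_succ acc j _ hj]
    simp

theorem map_getD_range (xs : List String) (d : String) (m : Nat) (h : m ≤ xs.length) :
    (List.range m).map (fun k => xs.getD k d) = xs.take m := by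
  induction m with
  | zero => simp
  | succ m ih =>
    rw [List.range_succ, List.map_append, ih (by omega), List.take_add_one]
    simp [List.getD, List.getElem?_eq_getElem (show m < xs.length by omega)]

theorem arrange_eq (total : Int) (seeds others : List String) :
    arrange_teams total seeds others = arrange_teams_alt total seeds others := by
  unfold arrange_teams arrange_teams_alt next_power_of_two next_power_of_two_b
  set e := PySem.Int.bitLength (total - 1) with he
  set n : Nat := 2^e with hn
  have hcast : (2:Int)^e = ((n:Nat):Int) := by push_cast [hn]; ring
  have hn1 : 1 ≤ (n:Int) := by
    have := Nat.two_pow_pos e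
    omega
  have hnt : total ≤ (n:Int) := by
    have h1 : (total-1).natAbs < 2^e := PySem.Int.lt_two_pow_bitLength (total-1)
    omega
  rw [hcast]
  dsimp only
  set padded := pad_teams (seeds ++ others) total with hpadded
  set kI : Int := max (2 * total - (n:Int)) 0 with hkI
  set F : Int → String :=
    fun s => if s ≤ kI then PySem.List.pyGetD padded (s-1) "" else "BYE" with hF
  have hk0 : 0 ≤ kI := by omega
  have hkt : kI ≤ max total 0 := by omega
  have hkn : kI ≤ (n:Int) := by omega
  -- the identity mapping
  have hmap : seeding_map ((n:Nat):Int) = (List.range n).map (fun i : Nat => ((i:Int)+1)) := by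
    rw [hn]
    exact_mod_cast seeding_map_pow e
  have hpos : ∀ s : Int, 1 ≤ s → s < (n:Int)+1 →
      PySem.List.pyGetD (seeding_map ((n:Nat):Int)) (s-1) 0 = s := by
    intro s hs1 hs2
    rw [hmap]
    have hlt : s - 1 < (((List.range n).map (fun i : Nat => ((i:Int)+1))).length : Int) := by
      simp; omega
    rw [PySem.List.pyGetD_eq_getElem _ 0 (by omega) hlt]
    simp
    omega
  -- Step A: replace the loop body by a pure position write of F
  have hbody :
      (PySem.List.pyRange 1 ((n:Int)+1) 1).foldl
        (fun placed seed_num =>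
          if seed_num ≤ total then
            if (PySem.Set.ofList (PySem.List.pyRange (total - ((n:Int) - total) + 1) (total + 1) 1)).contains seed_num = true then
              PySem.List.pySetD placed (PySem.List.pyGetD (seeding_map ((n:Nat):Int)) (seed_num - 1) 0 - 1) "BYE"
            else PySem.List.pySetD placed (PySem.List.pyGetD (seeding_map ((n:Nat):Int)) (seed_num - 1) 0 - 1) (PySem.List.pyGetD padded (seed_num - 1) "")
          else PySem.List.pySetD placed (PySem.List.pyGetD (seeding_map ((n:Nat):Int)) (seed_num - 1) 0 - 1) "BYE")
        (List.replicate ((n:Int)).toNat "")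
      = (PySem.List.pyRange 1 ((n:Int)+1) 1).foldl
          (fun pl s => PySem.List.pySetD pl (s-1) (F s))
          (List.replicate ((n:Int)).toNat "") := by
    apply PySem.List.foldl_congr_mem
    intro acc s hs
    rw [PySem.List.mem_pyRange_one] at hs
    obtain ⟨hs1, hs2⟩ := hs
    simp only [hpos s hs1 hs2, hF]
    by_cases hst : s ≤ total
    · by_cases hc : 2*total - (n:Int) + 1 ≤ s
      · have hmem : s ∈ PySem.Set.ofList (PySem.List.pyRange (total - ((n:Int) - total) + 1) (total + 1) 1) := by
          rw [PySem.Set.mem_ofList, PySem.List.mem_pyRange_one]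
          omega
        have hb : (PySem.Set.ofList (PySem.List.pyRange (total - ((n:Int) - total) + 1) (total + 1) 1)).contains s = true :=
          (PySem.Set.contains_iff _ _).mpr hmem
        rw [if_pos hst, if_pos hb, if_neg (by omega : ¬ s ≤ kI)]
      · rw [if_pos hst, if_neg (by simp; omega), if_pos (by omega : s ≤ kI)]
    · rw [if_neg hst, if_neg (by omega : ¬ s ≤ kI)]
  rw [hbody]
  simp only [Int.toNat_natCast]
  have hA := foldl_set_range F n 0 (List.replicate n "") (by simp)
  norm_num at hA
  rw [hA]
  rw [PySem.List.pyRange_one_append 1 (kI+1) ((n:Int)+1) (by omega) (by omega), List.map_append]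
  have hplen : padded.length = (seeds ++ others).length + (total - (seeds ++ others).length).toNat := by
    rw [hpadded, pad_spec]
    simp [PySem.List.length_pyRange_one]
    omega
  congr 1
  · -- real teams: F on 1..kI is indexing into padded
    have h1 : ∀ s ∈ PySem.List.pyRange 1 (kI+1) 1, F s = PySem.List.pyGetD padded (s-1) "" := by
      intro s hs
      rw [PySem.List.mem_pyRange_one] at hs
      simp only [hF]
      rw [if_pos (by omega)]
    rw [List.map_congr_left h1, PySem.List.pyRange_one 1 (kI+1), List.map_map]
    have h2 : ∀ k ∈ List.range ((kI+1-1)).toNat,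
        ((fun s => PySem.List.pyGetD padded (s-1) "") ∘ (fun k : Nat => (1:Int) + k)) k
        = padded.getD k "" := by
      intro k _
      simp only [Function.comp_apply]
      have : (1:Int) + k - 1 = (k:Int) := by ring
      rw [this, PySem.List.pyGetD_natCast]
    rw [List.map_congr_left h2]
    have hkk : (kI+1-1).toNat = kI.toNat := by omega
    rw [hkk, map_getD_range padded "" kI.toNat (by rw [hplen]; omega)]
    rw [PySem.List.slice_to _ hk0]
    -- padded.take kI.toNat = names.take kI.toNat
    by_cases h0t : 0 ≤ total
    · rw [PySem.List.slice_to _ h0t]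
      by_cases hL : total.toNat ≤ (seeds ++ others).length
      · have hlen1 : ((seeds ++ others).take total.toNat).length = total.toNat := by
          rw [List.length_take]
          omega
        have hnil1 : PySem.List.pyRange ((((seeds ++ others).take total.toNat).length : Int) + 1) (total + 1) 1 = [] := by
          apply PySem.List.pyRange_one_eq_nil
          rw [hlen1]
          omega
        have hnil2 : PySem.List.pyRange (((seeds ++ others).length : Int) + 1) (total + 1) 1 = [] := by
          apply PySem.List.pyRange_one_eq_nil
          omega
        rw [hnil1, hpadded, pad_spec, hnil2]
        simp only [List.map_nil, List.append_nil]
        rw [List.take_take]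
        congr 1
        omega
      · have hfull : (seeds ++ others).take total.toNat = seeds ++ others :=
          List.take_of_length_le (by omega)
        rw [hfull, hpadded, pad_spec]
    · have hk' : kI = 0 := by omega
      simp [hk']
  · -- BYE tail
    have h3 : ∀ s ∈ PySem.List.pyRange (kI+1) ((n:Int)+1) 1, F s = "BYE" := by
      intro s hs
      rw [PySem.List.mem_pyRange_one] at hs
      simp only [hF]
      rw [if_neg (by omega)]
    rw [List.map_congr_left h3, List.map_const', PySem.List.length_pyRange_one]
    congr 1
    omega

-- ===== VERDICT (by name: the statement is the Claim_ definition above) =====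
theorem arrange_teams_spec : Claim_equal_arrange_teams := by
  intro total seeds others _
  unfold Spec_arrange_teams
  exact arrange_eq total seeds others
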